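-- pv_equiv track=rewrite | github.com/lCubosl/data-structures-algorithms | exercises/week3/even.py | count_sublists1
-- ===== SOURCE A (Python) =====
-- def count_sublists1(numbers):
--   count = 0
--   run = 0
--
--   for num in numbers:
--     if num%2 ==0:
--       run +=1
--       count+=run
--     else:
--       run = 0
--
--   return count
-- ===== SOURCE B (Python) =====
-- def count_sublists1(numbers):
--   runs = []
--   cur = 0
--   for n in numbers:
--     if n % 2 == 0:
--       cur += 1
--     else:
--       if cur:
--         runs.append(cur)
--       cur = 0
--   if cur:
--     runs.append(cur)
--   return sum(L * (L + 1) // 2 for L in runs)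
-- ===== Notes on version B (the rewrite author's own statement) =====
-- stated objective: alternative
-- what changed: B collects the lengths of maximal runs of consecutive even numbers and sums the closed form L*(L+1)//2 per run, instead of A's per-element running counter added on every even element.
import Mathlib
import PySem

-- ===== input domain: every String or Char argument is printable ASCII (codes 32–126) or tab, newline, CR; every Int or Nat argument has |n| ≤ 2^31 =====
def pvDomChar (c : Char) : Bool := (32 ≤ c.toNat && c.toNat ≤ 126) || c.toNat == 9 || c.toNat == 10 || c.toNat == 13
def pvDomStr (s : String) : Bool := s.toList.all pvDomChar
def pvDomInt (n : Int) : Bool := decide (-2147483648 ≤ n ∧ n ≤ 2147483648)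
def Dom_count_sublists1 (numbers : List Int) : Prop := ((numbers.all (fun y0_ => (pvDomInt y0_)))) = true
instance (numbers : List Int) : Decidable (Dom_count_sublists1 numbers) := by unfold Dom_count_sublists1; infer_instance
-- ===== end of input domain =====

-- B collects the run lengths and sums a closed form per run; A adds a running counter on every even element.

-- ===== PORT A =====
-- loop over numbers carrying (count, run), exactly A's body
def count_sublists1_loop (l : List Int) (count run : Int) : Int :=
  match l with
  | [] => count
  | num :: t =>
      if PySem.Int.mod num 2 = 0 then
        count_sublists1_loop t (count + (run + 1)) (run + 1)
      else
        count_sublists1_loop t count 0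

def count_sublists1 (numbers : List Int) : Int :=
  count_sublists1_loop numbers 0 0

-- ===== PORT B =====
-- the scan of Source B building the list of maximal even-run lengths (runs, cur)
def count_sublists1_runs (l : List Int) (cur : Int) : List Int :=
  match l with
  | [] => if cur ≠ 0 then [cur] else []
  | n :: t =>
      if PySem.Int.mod n 2 = 0 then
        count_sublists1_runs t (cur + 1)
      else
        if cur ≠ 0 then cur :: count_sublists1_runs t 0 else count_sublists1_runs t 0

def count_sublists1_alt (numbers : List Int) : Int :=
  ((count_sublists1_runs numbers 0).map (fun L => PySem.Int.floordiv (L * (L + 1)) 2)).sum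

-- ===== PRECONDITION & SPEC =====
def Spec_count_sublists1 (numbers : List Int) (out : Int) : Prop := out = count_sublists1_alt numbers
instance (numbers : List Int) (out : Int) : Decidable (Spec_count_sublists1 numbers out) := by unfold Spec_count_sublists1; infer_instance

-- ===== CLAIM (what is proved, stated in full; the proofs are below) =====
def Claim_equal_count_sublists1 : Prop := ∀ (numbers : List Int), Dom_count_sublists1 numbers → Spec_count_sublists1 numbers (count_sublists1 numbers)

-- ===== LEMMAS AND PROOFS =====

def pvTri (L : Int) : Int := PySem.Int.floordiv (L * (L + 1)) 2

theorem pvTri_zero : pvTri 0 = 0 := by decide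

theorem pvTri_succ (r : Int) (h : 0 ≤ r) : pvTri (r + 1) = pvTri r + (r + 1) := by
  unfold pvTri
  rw [PySem.Int.floordiv_eq_ediv_of_pos (by omega), PySem.Int.floordiv_eq_ediv_of_pos (by omega)]
  have h2 : (2 : Int) ∣ r * (r + 1) := (Int.even_mul_succ_self r).two_dvd
  obtain ⟨k, hk⟩ := h2
  have : (r + 1) * (r + 1 + 1) = 2 * (k + (r + 1)) := by nlinarith
  rw [hk, this]
  omega

theorem loop_eq (l : List Int) : ∀ (c r : Int), 0 ≤ r →
    count_sublists1_loop l c r =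
      c + ((count_sublists1_runs l r).map pvTri).sum - pvTri r := by
  induction l with
  | nil =>
      intro c r hr
      simp only [count_sublists1_loop, count_sublists1_runs]
      by_cases h : r = 0
      · simp [h, pvTri_zero]
      · simp [h]
  | cons n t ih =>
      intro c r hr
      simp only [count_sublists1_loop, count_sublists1_runs]
      by_cases he : PySem.Int.mod n 2 = 0
      · rw [if_pos he, if_pos he, ih (c + (r + 1)) (r + 1) (by omega), pvTri_succ r hr]
        ring
      · rw [if_neg he, if_neg he, ih c 0 le_rfl, pvTri_zero]
        by_cases h0 : r = 0
        · simp [h0, pvTri_zero]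
        · simp only [h0, ne_eq, not_false_eq_true, if_pos, List.map_cons, List.sum_cons]
          ring

-- ===== VERDICT (by name: the statement is the Claim_ definition above) =====
theorem count_sublists1_spec : Claim_equal_count_sublists1 := by
  intro numbers _
  show count_sublists1 numbers = count_sublists1_alt numbers
  unfold count_sublists1 count_sublists1_alt
  rw [loop_eq numbers 0 0 le_rfl, pvTri_zero]
  simp only [sub_zero, zero_add]
  rfl
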